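-- pv_equiv track=rewrite | github.com/minsuh99/BaekjoonHub_python_practice | 프로그래머스/2/131704. 택배상자/택배상자.py | solution
-- ===== SOURCE A (Python) =====
-- def solution(order):
--     box = [i for i in range(len(order), 0, -1)]
--     stack = []
--     idx = 0
--     while idx != len(order):
--         if stack and stack[-1] == order[idx]:
--             stack.pop()
--             idx += 1
--         elif box:
--             stack.append(box.pop())
--         else:
--             return idx
--
--     return idx
-- ===== SOURCE B (Python) =====
-- def solution(order):
--     # Stack-free: the sub-belt stack is always the decreasing list of not-yet-
--     # delivered box numbers in 1..hi, so it suffices to track hi (largest box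
--     # taken off the main belt), a popped[] table, and top (largest undelivered
--     # number <= hi, 0 if none), recomputed by a descending amortized-O(n) skip.
--     n = len(order)
--     popped = [False] * (n + 1)
--     hi = 0
--     top = 0
--     placed = 0
--     for t in order:
--         if hi < t <= n:
--             hi = t
--             top = t
--         if t <= 0 or t != top:
--             return placed
--         popped[t] = True
--         placed += 1
--         top -= 1
--         while top > 0 and popped[top]:
--             top -= 1
--     return placed
-- ===== Notes on version B (the rewrite author's own statement) =====
-- stated objective: faster
-- what changed: B eliminates the explicit stack entirely: since the sub-belt stack is always the decreasing list of undelivered numbers in 1..hi, B keeps only a popped[] boolean table, the high-water mark hi, and a top pointer maintained by an amortized descending skip over popped entries, avoiding A's prebuilt box list and per-element list push/pop traffic.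
import Mathlib
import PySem

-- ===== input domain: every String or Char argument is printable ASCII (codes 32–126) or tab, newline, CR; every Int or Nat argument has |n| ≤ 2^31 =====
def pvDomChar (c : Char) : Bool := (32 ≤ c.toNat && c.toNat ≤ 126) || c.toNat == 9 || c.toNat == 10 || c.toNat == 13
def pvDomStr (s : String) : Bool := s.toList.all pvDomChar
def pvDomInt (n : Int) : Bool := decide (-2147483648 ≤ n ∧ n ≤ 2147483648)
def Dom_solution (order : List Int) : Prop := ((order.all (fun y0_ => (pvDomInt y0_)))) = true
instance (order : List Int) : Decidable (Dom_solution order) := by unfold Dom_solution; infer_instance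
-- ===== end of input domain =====

-- B is stack-free: it exploits that A's sub-belt stack is always the decreasing list of
-- undelivered numbers in 1..hi, so a popped[] table plus a descending 'top' pointer suffice
-- (alternative algorithm, same amortized O(n) cost).

-- ===== PORT A =====
-- A's while loop.  Python lists push/pop at the END; both `stack` and `box` are stored
-- reversed here (head = Python's last element), an exact representation of the same stack.
-- `idx` is a Nat carrying `idx ≤ order.length` (true throughout A's loop), so
-- `order.getD idx 0` equals Python's `order[idx]` on every reached state (idx < length there).
def solutionLoop (order box stack : List Int) (idx : Nat) (h : idx ≤ order.length) : Int :=
  if hx : idx = order.length then (idx : Int)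
  else if stack.head? = some (order.getD idx 0) then
    solutionLoop order box stack.tail (idx + 1) (by omega)
  else
    match box with
    | b :: bs => solutionLoop order bs (b :: stack) idx h
    | [] => (idx : Int)
termination_by 2 * box.length + (order.length - idx)
decreasing_by · omega
              · simp

def solution (order : List Int) : Int :=
  -- box = [i for i in range(len(order), 0, -1)], stored reversed (see above)
  solutionLoop order ((PySem.List.pyRange (order.length : Int) 0 (-1)).reverse) [] 0 (by omega)

-- ===== PORT B =====
-- `while top > 0 and popped[top]: top -= 1` (popped[top] is in range on every reached
-- state: 0 < top ≤ n < len(popped), so getD is exact there)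
def skipLoop (popped : List Bool) (top : Int) : Int :=
  if h : 0 < top ∧ popped.getD top.toNat false = true then skipLoop popped (top - 1)
  else top
termination_by top.toNat
decreasing_by omega

-- the `for t in order` loop over state (popped, hi, top, placed)
def bLoop (n : Int) (targets : List Int) (popped : List Bool) (hi top placed : Int) : Int :=
  match targets with
  | [] => placed
  | t :: ts =>
    let hi' := if hi < t ∧ t ≤ n then t else hi
    let top' := if hi < t ∧ t ≤ n then t else top
    if t ≤ 0 ∨ t ≠ top' then placed
    else bLoop n ts (popped.set t.toNat true) hi'
           (skipLoop (popped.set t.toNat true) (top' - 1)) (placed + 1)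

def solution_alt (order : List Int) : Int :=
  bLoop (order.length : Int) order (List.replicate (order.length + 1) false) 0 0 0

-- ===== PRECONDITION & SPEC =====
def Spec_solution (order : List Int) (out : Int) : Prop := out = solution_alt order
instance (order : List Int) (out : Int) : Decidable (Spec_solution order out) := by unfold Spec_solution; infer_instance

-- ===== CLAIM (what is proved, stated in full; the proofs are below) =====
def Claim_equal_solution : Prop := ∀ (order : List Int), Dom_solution order → Spec_solution order (solution order)

-- ===== LEMMAS AND PROOFS =====

-- A's stack at a reachable state: the undelivered numbers in 1..hi, in decreasing order
def stackOf (p : List Bool) (hi : Nat) : List Int :=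
  (((List.range' 1 hi).filter (fun k => !(p.getD k false))).reverse).map (fun k => (k : Int))

theorem stackOf_zero (p : List Bool) : stackOf p 0 = [] := by simp [stackOf]

theorem range1_succ (j : Nat) : List.range' 1 (j+1) = List.range' 1 j ++ [j+1] := by
  simpa [Nat.add_comm] using List.range'_1_concat (s := 1) (n := j)

theorem stackOf_succ_true (p : List Bool) (j : Nat) (h : p.getD (j+1) false = true) :
    stackOf p (j+1) = stackOf p j := by
  have h' : p[j+1]?.getD false = true := by simpa [List.getD_eq_getElem?_getD] using h
  simp [stackOf, range1_succ, List.filter_append, h']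

theorem stackOf_succ_false (p : List Bool) (j : Nat) (h : p.getD (j+1) false = false) :
    stackOf p (j+1) = ((j+1 : Nat) : Int) :: stackOf p j := by
  have h' : p[j+1]?.getD false = false := by simpa [List.getD_eq_getElem?_getD] using h
  simp [stackOf, range1_succ, List.filter_append, h']

theorem mem_stackOf (p : List Bool) (hi : Nat) (x : Int) (hx : x ∈ stackOf p hi) :
    1 ≤ x ∧ x ≤ (hi : Int) := by
  induction hi with
  | zero => simp [stackOf_zero] at hx
  | succ j ih =>
    by_cases h : p.getD (j+1) false = true
    · rw [stackOf_succ_true p j h] at hx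
      have := ih hx; constructor <;> [exact this.1; exact le_trans this.2 (by push_cast; omega)]
    · rw [stackOf_succ_false p j (by simpa using h)] at hx
      rcases List.mem_cons.mp hx with h1 | h1
      · subst h1; constructor <;> push_cast <;> omega
      · have := ih h1; constructor <;> [exact this.1; exact le_trans this.2 (by push_cast; omega)]

-- skipLoop finds the head of the implicit stack
theorem skipLoop_eq (p : List Bool) (j : Nat) :
    skipLoop p (j : Int) = (stackOf p j).headD 0 := by
  induction j with
  | zero => rw [skipLoop]; simp [stackOf_zero]
  | succ j ih =>
    by_cases h : p.getD (j+1) false = true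
    · rw [skipLoop]
      have : ((j+1 : Nat) : Int).toNat = j + 1 := by omega
      rw [dif_pos ⟨by omega, by rw [this]; exact h⟩]
      have : ((j+1 : Nat) : Int) - 1 = (j : Int) := by push_cast; ring
      rw [this, ih, stackOf_succ_true p j h]
    · rw [skipLoop]
      have ht : ((j+1 : Nat) : Int).toNat = j + 1 := by omega
      rw [dif_neg (fun hc => h (ht ▸ hc.2))]
      rw [stackOf_succ_false p j (by simpa using h)]
      simp

-- if t is the stack head, everything strictly between t and hi is delivered
theorem head_popped_above (p : List Bool) (hi : Nat) (t : Int)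
    (h : (stackOf p hi).head? = some t) :
    ∀ k : Nat, t < (k : Int) → k ≤ hi → p.getD k false = true := by
  induction hi with
  | zero => simp [stackOf_zero] at h
  | succ j ih =>
    intro k hk1 hk2
    by_cases hp : p.getD (j+1) false = true
    · rw [stackOf_succ_true p j hp] at h
      rcases Nat.lt_or_ge k (j+1) with hlt | hge
      · exact ih h k hk1 (by omega)
      · have : k = j + 1 := by omega
        rw [this]; exact hp
    · rw [stackOf_succ_false p j (by simpa using hp)] at h
      simp at h
      omega

-- the implicit stack does not change between a level where everything above is delivered
theorem stackOf_eq_of_popped_above (p : List Bool) (j hi : Nat) (hj : j ≤ hi)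
    (h : ∀ k : Nat, j < k → k ≤ hi → p.getD k false = true) :
    stackOf p hi = stackOf p j := by
  induction hi with
  | zero => have : j = 0 := by omega
            rw [this]
  | succ i ih =>
    rcases Nat.lt_or_ge j (i+1) with hlt | hge
    · rw [stackOf_succ_true p i (h (i+1) (by omega) (by omega))]
      exact ih (by omega) (fun k hk1 hk2 => h k hk1 (by omega))
    · have : j = i + 1 := by omega
      rw [this]

-- getD after a set at a different index
theorem getD_set_ne (p : List Bool) (i k : Nat) (h : i ≠ k) :
    (p.set i true).getD k false = p.getD k false := by
  simp [List.getD_eq_getElem?_getD, List.getElem?_set_ne h]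

-- setting an index above j does not change the implicit stack up to j
theorem stackOf_set_high (p : List Bool) (i j : Nat) (h : j < i) :
    stackOf (p.set i true) j = stackOf p j := by
  induction j with
  | zero => simp [stackOf_zero]
  | succ m ih =>
    have hne : i ≠ m + 1 := by omega
    by_cases hp : p.getD (m+1) false = true
    · rw [stackOf_succ_true p m hp,
        stackOf_succ_true (p.set i true) m ((getD_set_ne p i (m+1) hne).trans hp),
        ih (by omega)]
    · rw [stackOf_succ_false p m (by simpa using hp),
        stackOf_succ_false (p.set i true) m ((getD_set_ne p i (m+1) hne).trans (by simpa using hp)),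
        ih (by omega)]

-- popping the head: set the head index, the stack becomes its tail
theorem stackOf_set_head (p : List Bool) (hi : Nat) (t : Int)
    (h : (stackOf p hi).head? = some t) (hlen : t.toNat < p.length) :
    stackOf (p.set t.toNat true) hi = (stackOf p hi).tail := by
  induction hi with
  | zero => simp [stackOf_zero] at h
  | succ j ih =>
    by_cases hp : p.getD (j+1) false = true
    · rw [stackOf_succ_true p j hp] at h ⊢
      rw [← ih h]
      have ht1 : 1 ≤ t := (mem_stackOf p j t (List.mem_of_mem_head? h)).1
      have ht2 : t ≤ (j : Int) := (mem_stackOf p j t (List.mem_of_mem_head? h)).2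
      have hne : t.toNat ≠ j + 1 := by omega
      exact stackOf_succ_true _ j (by rw [getD_set_ne p _ _ hne]; exact hp)
    · rw [stackOf_succ_false p j (by simpa using hp)] at h ⊢
      simp at h
      have htn : t.toNat = j + 1 := by omega
      rw [stackOf_succ_true _ j (by
        rw [← htn]
        simp [List.getD_eq_getElem?_getD, hlen])]
      rw [stackOf_set_high p t.toNat j (by omega)]
      simp

-- everything in 1..hi undelivered above hi stays undelivered after setting t ≤ hi
-- advancing B's (hi, top) state by one lazily-pushed box does not change its result
theorem bLoop_shift (n t : Int) (ts : List Int) (p : List Bool) (hi top placed : Int)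
    (h0 : 0 ≤ hi) (h1 : hi < t) (h2 : t ≤ n) :
    bLoop n (t :: ts) p (hi + 1) (hi + 1) placed = bLoop n (t :: ts) p hi top placed := by
  have hc : hi < t ∧ t ≤ n := ⟨h1, h2⟩
  by_cases hc2 : hi + 1 < t ∧ t ≤ n
  · simp only [bLoop, if_pos hc, if_pos hc2]
  · have ht : t = hi + 1 := by omega
    subst ht
    simp only [bLoop, if_pos hc, if_neg hc2]

-- A's failure run: no remaining box matches t, so A pushes everything and returns idx
theorem a_fail (order : List Int) (stack : List Int) (idx hi : Nat)
    (h : idx ≤ order.length) (hhi : hi ≤ order.length) (hx : idx ≠ order.length)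
    (hhead : stack.head? ≠ some (order.getD idx 0))
    (hnot : ¬ ((hi : Int) < order.getD idx 0 ∧ order.getD idx 0 ≤ (order.length : Int))) :
    solutionLoop order (PySem.List.pyRange ((hi : Int) + 1) ((order.length : Int) + 1) 1) stack idx h
      = (idx : Int) := by
  rcases Nat.lt_or_ge hi order.length with hlt | hge
  · rw [PySem.List.pyRange_one_cons (by push_cast; omega)]
    rw [solutionLoop.eq_def]
    simp only [dif_neg hx, if_neg hhead]
    have : (hi : Int) + 1 + 1 = ((hi + 1 : Nat) : Int) + 1 := by push_cast; ring
    rw [this]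
    exact a_fail order _ idx (hi + 1) h (by omega) hx
      (by simp only [List.head?_cons]; intro hc
          have : ((hi : Int)) + 1 = order.getD idx 0 := by simpa using hc
          push_cast at hnot ⊢; omega)
      (by push_cast at hnot ⊢; omega)
  · rw [PySem.List.pyRange_one_eq_nil (by push_cast; omega)]
    rw [solutionLoop.eq_def]
    simp only [dif_neg hx, if_neg hhead]
termination_by order.length - hi

-- Main invariant: A's state (box = hi+1..n ascending, stack = stackOf p hi) corresponds to
-- B's state (popped = p, hi, top = head of the implicit stack, placed = idx)
theorem main_inv (order : List Int) (p : List Bool) (hi idx : Nat)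
    (h : idx ≤ order.length) (hhi : hi ≤ order.length)
    (hlen : p.length = order.length + 1)
    (hup : ∀ k : Nat, hi < k → p.getD k false = false) :
    solutionLoop order (PySem.List.pyRange ((hi : Int) + 1) ((order.length : Int) + 1) 1) (stackOf p hi) idx h
      = bLoop (order.length : Int) (order.drop idx) p (hi : Int) ((stackOf p hi).headD 0) (idx : Int) := by
  by_cases hx : idx = order.length
  · subst hx
    rw [solutionLoop.eq_def, List.drop_length]
    simp [bLoop]
  · have hlt : idx < order.length := by omega
    have hdrop : order.drop idx = order[idx] :: order.drop (idx + 1) :=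
      List.drop_eq_getElem_cons hlt
    have hget : order.getD idx 0 = order[idx] := by
      simp [List.getD_eq_getElem?_getD, List.getElem?_eq_getElem hlt]
    by_cases hhead : (stackOf p hi).head? = some order[idx]
    · -- pop-and-advance step
      have hmem := mem_stackOf p hi order[idx] (List.mem_of_mem_head? hhead)
      have htn : order[idx].toNat ≤ hi := by omega
      have hlenp : order[idx].toNat < p.length := by omega
      rw [solutionLoop.eq_def]
      simp only [dif_neg hx, hget, if_pos hhead]
      rw [← stackOf_set_head p hi order[idx] hhead hlenp]
      rw [main_inv order (p.set order[idx].toNat true) hi (idx + 1) (by omega) hhi (by simpa using hlen)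
        (by intro k hk
            rw [getD_set_ne p _ _ (by omega)]
            exact hup k hk)]
      rw [hdrop, bLoop]
      have hcond : ¬ ((hi : Int) < order[idx] ∧ order[idx] ≤ (order.length : Int)) := by
        intro hc; omega
      have htop : (stackOf p hi).headD 0 = order[idx] := by
        cases hh : (stackOf p hi) with
        | nil => rw [hh] at hhead; simp at hhead
        | cons a s => rw [hh] at hhead; simp at hhead; simp [hh, hhead]
      simp only [if_neg hcond, htop]
      rw [if_neg (by omega : ¬ (order[idx] ≤ 0 ∨ order[idx] ≠ order[idx]))]
      have hskip : skipLoop (p.set order[idx].toNat true) (order[idx] - 1)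
          = (stackOf (p.set order[idx].toNat true) hi).headD 0 := by
        have hcast : order[idx] - 1 = ((order[idx].toNat - 1 : Nat) : Int) := by omega
        rw [hcast, skipLoop_eq]
        rw [stackOf_eq_of_popped_above (p.set order[idx].toNat true) (order[idx].toNat - 1) hi
          (by omega)
          (by intro k hk1 hk2
              by_cases hkt : k = order[idx].toNat
              · subst hkt
                simp [List.getD_eq_getElem?_getD, hlenp]
              · rw [getD_set_ne p _ _ (by omega)]
                exact head_popped_above p hi order[idx] hhead k (by omega) hk2)]
      rw [hskip]
      push_cast
      ring_nf
    · by_cases hcond : (hi : Int) < order[idx] ∧ order[idx] ≤ (order.length : Int)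
      · -- lazy push: A pushes hi+1, B's state (hi+1, top hi+1) steps identically to (hi, top)
        have hhin : hi < order.length := by omega
        rw [PySem.List.pyRange_one_cons (by push_cast; omega)]
        rw [solutionLoop.eq_def]
        simp only [dif_neg hx, hget, if_neg hhead]
        have hup1 : p.getD (hi + 1) false = false := hup (hi + 1) (by omega)
        have hstk : ((hi : Int) + 1) :: stackOf p hi = stackOf p (hi + 1) := by
          rw [stackOf_succ_false p hi hup1]; push_cast; ring_nf
        have hbox : (hi : Int) + 1 + 1 = ((hi + 1 : Nat) : Int) + 1 := by push_cast; ring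
        rw [hstk, hbox]
        rw [main_inv order p (hi + 1) idx h (by omega) hlen
          (by intro k hk; exact hup k (by omega))]
        -- both B-states step to the same recursive call
        rw [hdrop]
        have htop1 : (stackOf p (hi + 1)).headD 0 = (hi : Int) + 1 := by
          rw [stackOf_succ_false p hi hup1]; push_cast; simp
        rw [htop1]
        have hcast : ((hi + 1 : Nat) : Int) = (hi : Int) + 1 := by push_cast; ring
        rw [hcast]
        exact bLoop_shift (order.length : Int) order[idx] (order.drop (idx + 1)) p (hi : Int)
          ((stackOf p hi).headD 0) (idx : Int) (by omega) hcond.1 hcond.2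
      · -- failure: no remaining box ever matches; both return idx
        rw [a_fail order (stackOf p hi) idx hi h hhi hx (by rw [hget]; exact hhead)
          (by rw [hget]; exact hcond)]
        rw [hdrop, bLoop]
        simp only [if_neg hcond]
        have hg : order[idx] ≤ 0 ∨ order[idx] ≠ (stackOf p hi).headD 0 := by
          by_contra hgc
          push_neg at hgc
          obtain ⟨hpos, heqt⟩ := hgc
          cases hh : (stackOf p hi) with
          | nil => rw [hh] at heqt; simp at heqt; omega
          | cons a s =>
            rw [hh] at heqt hhead
            simp at heqt
            exact hhead (by simp [heqt])
        rw [if_pos hg]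
termination_by (order.length - idx) * (order.length + 1) + (order.length - hi)
decreasing_by · have h1 : order.length - idx = (order.length - (idx + 1)) + 1 := by omega
                rw [h1, Nat.succ_mul]
                omega
              · omega

-- ===== VERDICT (by name: the statement is the Claim_ definition above) =====
theorem solution_spec : Claim_equal_solution := by
  intro order _
  unfold Spec_solution solution solution_alt
  rw [PySem.List.pyRange_neg_one_eq_reverse, List.reverse_reverse]
  have h0 : stackOf (List.replicate (order.length + 1) false) 0 = [] := stackOf_zero _
  have := main_inv order (List.replicate (order.length + 1) false) 0 0 (by omega) (by omega)
    (by simp)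
    (by intro k _
        simp [List.getD_eq_getElem?_getD, List.getElem?_replicate]
        split <;> rfl)
  rw [h0] at this
  simpa using this
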